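-- pv_equiv track=rewrite | github.com/chambai/AdaDeepStream | framework/dnn_wrapper.py | get_adaption_variables
-- ===== SOURCE A (Python) =====
-- def get_adaption_variables(adaption_strategies):
--     do_partial_fit = True
--     always_update = False
--     add_adaption_layers = False
--     limit_adaption_layers = False
--     reduce_lr_percent = 0
--     nearest_class_mean = False
--     scr = False
--     gdumb_rv = False
--     act_vote = False
--     lin = False
--     for adaption_strategy in adaption_strategies:
--         if adaption_strategy == 'none':
--             do_partial_fit = False
--         elif adaption_strategy == 'always_update':
--             always_update = True
--         elif adaption_strategy == 'add_adaption_layers':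
--             add_adaption_layers = True
--         elif adaption_strategy == 'limit_adaption_layers':
--             limit_adaption_layers = True
--         elif adaption_strategy == 'reduce_lr_percent':
--             reduce_lr_percent = 10  # reduce learning rate by 10 percent
--         elif adaption_strategy == 'nearest_class_mean':
--             nearest_class_mean = True  # use nearest class mean instead of softmax
--         elif adaption_strategy == 'scr':
--             scr = True
--         elif adaption_strategy == 'gdumb_rv':
--             gdumb_rv = True
--         elif adaption_strategy == 'act_vote':
--             act_vote = True
--         elif adaption_strategy == 'lin':
--             lin = True
--         else:
--             raise Exception('unhandled adaption_strategy of %s' % (adaption_strategy))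
--
--     return do_partial_fit, always_update, add_adaption_layers, limit_adaption_layers, reduce_lr_percent, nearest_class_mean, scr, gdumb_rv, act_vote, lin
-- ===== SOURCE B (Python) =====
-- _KNOWN = {'none', 'always_update', 'add_adaption_layers', 'limit_adaption_layers',
--           'reduce_lr_percent', 'nearest_class_mean', 'scr', 'gdumb_rv', 'act_vote', 'lin'}
--
--
-- def get_adaption_variables(adaption_strategies):
--     strategies = list(adaption_strategies)
--     for s in strategies:
--         if s not in _KNOWN:
--             raise Exception('unhandled adaption_strategy of %s' % (s,))
--     present = set(strategies)
--     return ('none' not in present,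
--             'always_update' in present,
--             'add_adaption_layers' in present,
--             'limit_adaption_layers' in present,
--             10 if 'reduce_lr_percent' in present else 0,
--             'nearest_class_mean' in present,
--             'scr' in present,
--             'gdumb_rv' in present,
--             'act_vote' in present,
--             'lin' in present)
-- ===== Notes on version B (the rewrite author's own statement) =====
-- stated objective: idiomatic
-- what changed: Replaces the per-element if/elif dispatch loop mutating ten locals with a single validation pass and direct per-flag set-membership tests.
import Mathlib
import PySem

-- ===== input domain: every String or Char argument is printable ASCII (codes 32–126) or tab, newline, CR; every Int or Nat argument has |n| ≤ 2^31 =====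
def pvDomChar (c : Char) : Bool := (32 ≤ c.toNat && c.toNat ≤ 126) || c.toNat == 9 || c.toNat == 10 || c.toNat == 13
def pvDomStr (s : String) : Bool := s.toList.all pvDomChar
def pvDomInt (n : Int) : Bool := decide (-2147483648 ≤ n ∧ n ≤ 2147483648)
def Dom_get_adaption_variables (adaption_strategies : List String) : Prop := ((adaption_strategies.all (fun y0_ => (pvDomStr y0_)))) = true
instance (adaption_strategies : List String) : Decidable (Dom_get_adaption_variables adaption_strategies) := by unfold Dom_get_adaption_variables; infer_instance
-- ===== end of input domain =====

-- B replaces A's if/elif dispatch loop by one validation pass plus per-flag membership tests (idiomatic; same cost).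
-- Pre_ excludes exactly the inputs containing an unknown strategy string, on which the Python A raises Exception (B raises the same).

-- ===== PORT A =====
-- the loop of A, step for step: state = the ten locals; 'none' result = the explicit raise
def pvGoA : List String → (Bool × Bool × Bool × Bool × Int × Bool × Bool × Bool × Bool × Bool) →
    Option (Bool × Bool × Bool × Bool × Int × Bool × Bool × Bool × Bool × Bool)
  | [], s => some s
  | x :: xs, (a, b, c, d, e, f, g, h, i, j) =>
    if x = "none" then pvGoA xs (false, b, c, d, e, f, g, h, i, j)
    else if x = "always_update" then pvGoA xs (a, true, c, d, e, f, g, h, i, j)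
    else if x = "add_adaption_layers" then pvGoA xs (a, b, true, d, e, f, g, h, i, j)
    else if x = "limit_adaption_layers" then pvGoA xs (a, b, c, true, e, f, g, h, i, j)
    else if x = "reduce_lr_percent" then pvGoA xs (a, b, c, d, 10, f, g, h, i, j)
    else if x = "nearest_class_mean" then pvGoA xs (a, b, c, d, e, true, g, h, i, j)
    else if x = "scr" then pvGoA xs (a, b, c, d, e, f, true, h, i, j)
    else if x = "gdumb_rv" then pvGoA xs (a, b, c, d, e, f, g, true, i, j)
    else if x = "act_vote" then pvGoA xs (a, b, c, d, e, f, g, h, true, j)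
    else if x = "lin" then pvGoA xs (a, b, c, d, e, f, g, h, i, true)
    else none   -- raise Exception(...)

def get_adaption_variables (adaption_strategies : List String) : Bool × Bool × Bool × Bool × Int × Bool × Bool × Bool × Bool × Bool :=
  (pvGoA adaption_strategies (true, false, false, false, 0, false, false, false, false, false)).getD
    (true, false, false, false, 0, false, false, false, false, false)   -- getD: totalization only; 'none' is outside Pre_

-- ===== PORT B =====
def pvKnown : List String :=
  ["none", "always_update", "add_adaption_layers", "limit_adaption_layers", "reduce_lr_percent",
   "nearest_class_mean", "scr", "gdumb_rv", "act_vote", "lin"]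

def get_adaption_variables_alt (adaption_strategies : List String) : Bool × Bool × Bool × Bool × Int × Bool × Bool × Bool × Bool × Bool :=
  if adaption_strategies.all (fun s => pvKnown.contains s) then   -- else: raise (outside Pre_); guard totalizes only
    (!(adaption_strategies.contains "none"),
     adaption_strategies.contains "always_update",
     adaption_strategies.contains "add_adaption_layers",
     adaption_strategies.contains "limit_adaption_layers",
     if adaption_strategies.contains "reduce_lr_percent" then (10 : Int) else 0,
     adaption_strategies.contains "nearest_class_mean",
     adaption_strategies.contains "scr",
     adaption_strategies.contains "gdumb_rv",
     adaption_strategies.contains "act_vote",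
     adaption_strategies.contains "lin")
  else (true, false, false, false, 0, false, false, false, false, false)

-- ===== PRECONDITION & SPEC =====
-- Pre_ excludes exactly the inputs containing a string that is none of the ten known strategies: there the Python A raises Exception.
def Pre_get_adaption_variables (adaption_strategies : List String) : Prop :=
  ∀ x ∈ adaption_strategies, x ∈ pvKnown
instance (adaption_strategies : List String) : Decidable (Pre_get_adaption_variables adaption_strategies) := by
  unfold Pre_get_adaption_variables; infer_instance

def pvWitness_get_adaption_variables : List String := ["none", "scr", "reduce_lr_percent"]

def Spec_get_adaption_variables (adaption_strategies : List String) (out : Bool × Bool × Bool × Bool × Int × Bool × Bool × Bool × Bool × Bool) : Prop := out = get_adaption_variables_alt adaption_strategies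
instance (adaption_strategies : List String) (out : Bool × Bool × Bool × Bool × Int × Bool × Bool × Bool × Bool × Bool) : Decidable (Spec_get_adaption_variables adaption_strategies out) := by
  unfold Spec_get_adaption_variables
  obtain ⟨o1, o2, o3, o4, o5, o6, o7, o8, o9, o10⟩ := out
  obtain ⟨p1, p2, p3, p4, p5, p6, p7, p8, p9, p10⟩ := get_adaption_variables_alt adaption_strategies
  simp only [Prod.mk.injEq]
  infer_instance

-- ===== CLAIM (what is proved, stated in full; the proofs are below) =====
def Claim_equal_get_adaption_variables : Prop := ∀ (adaption_strategies : List String), Dom_get_adaption_variables adaption_strategies → Pre_get_adaption_variables adaption_strategies → Spec_get_adaption_variables adaption_strategies (get_adaption_variables adaption_strategies)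

-- ===== LEMMAS AND PROOFS =====
-- A's loop from an arbitrary state, on a list of known strategies, ends in the componentwise merge of that state with the membership flags.
theorem pvGoA_eq (l : List String) : ∀ (a b c d : Bool) (e : Int) (f g h i j : Bool),
    (∀ x ∈ l, x ∈ pvKnown) →
    pvGoA l (a, b, c, d, e, f, g, h, i, j) =
      some (a && !(l.contains "none"),
            b || l.contains "always_update",
            c || l.contains "add_adaption_layers",
            d || l.contains "limit_adaption_layers",
            if l.contains "reduce_lr_percent" then 10 else e,
            f || l.contains "nearest_class_mean",
            g || l.contains "scr",
            h || l.contains "gdumb_rv",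
            i || l.contains "act_vote",
            j || l.contains "lin") := by
  induction l with
  | nil => intro a b c d e f g h i j _; simp [pvGoA]
  | cons x xs ih =>
    intro a b c d e f g h i j hk
    have hx : x ∈ pvKnown := hk x (List.mem_cons_self ..)
    have hxs : ∀ y ∈ xs, y ∈ pvKnown := fun y hy => hk y (List.mem_cons_of_mem _ hy)
    simp only [pvKnown, List.mem_cons, List.not_mem_nil, or_false] at hx
    rcases hx with rfl | rfl | rfl | rfl | rfl | rfl | rfl | rfl | rfl | rfl <;>
      simp [pvGoA, ih _ _ _ _ _ _ _ _ _ _ hxs]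

-- ===== VERDICT (by name: the statement is the Claim_ definition above) =====
theorem get_adaption_variables_spec : Claim_equal_get_adaption_variables := by
  intro l _ hpre
  unfold Spec_get_adaption_variables get_adaption_variables get_adaption_variables_alt
  have hall : l.all (fun s => pvKnown.contains s) = true := by
    simp only [List.all_eq_true]
    intro x hx
    simpa using hpre x hx
  rw [pvGoA_eq l _ _ _ _ _ _ _ _ _ _ hpre, hall]
  simp
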